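-- pv_equiv track=rewrite | github.com/maxfilter/Rosalind | Bioinformatics_Stronghold/LEXF/lexf.py | get_ordered_permutations
-- ===== SOURCE A (Python) =====
-- from itertools import product
--
-- def get_ordered_permutations(alphabet, n):
--     permutations_list = list(product(alphabet, repeat=n))
--     ordered_permutations = ''
--
--     for permutation in permutations_list:
--         for base in permutation:
--             ordered_permutations += base
--         ordered_permutations += '\n'
--     return ordered_permutations
-- ===== SOURCE B (Python) =====
-- def get_ordered_permutations(alphabet, n):
--     # build the length-k prefixes level by level instead of itertools.product
--     lines = ['']
--     for _ in range(n):
--         lines = [p + ch for p in lines for ch in alphabet]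
--     return ''.join(line + '\n' for line in lines)
-- ===== Notes on version B (the rewrite author's own statement) =====
-- stated objective: alternative
-- what changed: Replaces the materialised itertools.product tuple list plus a double string-concatenation loop with an iterative level-by-level prefix builder (repeated cross-product comprehension) finished by a single join.
import Mathlib
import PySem

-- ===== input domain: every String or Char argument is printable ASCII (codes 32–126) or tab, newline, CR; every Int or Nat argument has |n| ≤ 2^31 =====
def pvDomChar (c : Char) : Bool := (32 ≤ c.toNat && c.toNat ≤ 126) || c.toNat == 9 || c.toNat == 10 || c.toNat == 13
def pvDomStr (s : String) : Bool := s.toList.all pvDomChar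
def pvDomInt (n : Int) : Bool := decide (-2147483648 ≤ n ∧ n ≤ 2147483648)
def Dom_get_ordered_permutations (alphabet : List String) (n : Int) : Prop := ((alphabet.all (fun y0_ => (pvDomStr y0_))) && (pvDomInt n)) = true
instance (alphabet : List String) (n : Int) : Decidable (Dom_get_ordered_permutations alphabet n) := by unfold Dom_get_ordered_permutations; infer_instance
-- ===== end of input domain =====

-- B replaces the materialised itertools.product list with an iterative level-by-level prefix builder; a different decomposition of the same output.


-- ===== PORT A =====
-- list(product(alphabet, repeat=n)) in itertools order (leftmost coordinate varies slowest)
def pvProd (alphabet : List String) : Nat → List (List String)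
  | 0 => [[]]
  | m + 1 => alphabet.flatMap (fun x => (pvProd alphabet m).map (x :: ·))

def get_ordered_permutations (alphabet : List String) (n : Int) : String :=
  (pvProd alphabet n.toNat).foldl
    (fun acc perm => (perm.foldl (fun a b => a ++ b) acc) ++ "\n") ""

-- ===== PORT B =====
-- ''.join(…) of Source B
def pvJoin (l : List String) : String := l.foldl (fun a b => a ++ b) ""

-- the 'for _ in range(n): lines = [p + ch for p in lines for ch in alphabet]' loop
def pvLines (alphabet : List String) : Nat → List String
  | 0 => [""]
  | m + 1 => (pvLines alphabet m).flatMap (fun p => alphabet.map (fun ch => p ++ ch))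

def get_ordered_permutations_alt (alphabet : List String) (n : Int) : String :=
  pvJoin ((pvLines alphabet n.toNat).map (fun line => line ++ "\n"))

-- ===== PRECONDITION & SPEC =====
-- Pre_ excludes n < 0, where A raises ValueError (itertools.product rejects a negative repeat).
def Pre_get_ordered_permutations (alphabet : List String) (n : Int) : Prop := 0 ≤ n
instance (alphabet : List String) (n : Int) : Decidable (Pre_get_ordered_permutations alphabet n) := by unfold Pre_get_ordered_permutations; infer_instance

def pvWitness_get_ordered_permutations : List String × Int := (["A", "C", "G", "T"], 2)

def Spec_get_ordered_permutations (alphabet : List String) (n : Int) (out : String) : Prop := out = get_ordered_permutations_alt alphabet n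
instance (alphabet : List String) (n : Int) (out : String) : Decidable (Spec_get_ordered_permutations alphabet n out) := by unfold Spec_get_ordered_permutations; infer_instance

-- ===== CLAIM (what is proved, stated in full; the proofs are below) =====
def Claim_equal_get_ordered_permutations : Prop := ∀ (alphabet : List String) (n : Int), Dom_get_ordered_permutations alphabet n → Pre_get_ordered_permutations alphabet n → Spec_get_ordered_permutations alphabet n (get_ordered_permutations alphabet n)

-- ===== LEMMAS AND PROOFS =====

theorem pvFoldl_shift (perm : List String) : ∀ acc : String,
    perm.foldl (fun a b => a ++ b) acc = acc ++ pvJoin perm := by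
  induction perm with
  | nil => intro acc; simp only [List.foldl_nil, pvJoin, String.append_empty]
  | cons x xs ih =>
      intro acc
      rw [List.foldl_cons, ih]
      conv_rhs => rw [pvJoin, List.foldl_cons, ih]
      rw [String.empty_append, String.append_assoc]

theorem pvJoin_cons (x : String) (xs : List String) : pvJoin (x :: xs) = x ++ pvJoin xs := by
  rw [pvJoin, List.foldl_cons, pvFoldl_shift, String.empty_append]

theorem pvJoin_append (xs ys : List String) : pvJoin (xs ++ ys) = pvJoin xs ++ pvJoin ys := by
  induction xs with
  | nil => simp only [List.nil_append, pvJoin, List.foldl_nil, String.empty_append]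
  | cons x xs ih => simp only [List.cons_append, pvJoin_cons, ih, String.append_assoc]

-- 'acc += f(x)' over a list is acc ++ concatenation of the images
theorem pvFoldl_cat {α : Type} (f : α → String) (l : List α) : ∀ acc : String,
    l.foldl (fun a x => a ++ f x) acc = acc ++ pvJoin (l.map f) := by
  induction l with
  | nil => intro acc; simp only [List.foldl_nil, List.map_nil, pvJoin, String.append_empty]
  | cons x xs ih =>
      intro acc
      simp only [List.foldl_cons, List.map_cons, pvJoin_cons, ih, String.append_assoc]

-- normal form of A's double loop
theorem pvA_eq (alphabet : List String) (m : Nat) :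
    (pvProd alphabet m).foldl (fun acc perm => (perm.foldl (fun a b => a ++ b) acc) ++ "\n") ""
      = pvJoin ((pvProd alphabet m).map (fun perm => pvJoin perm ++ "\n")) := by
  have hbody : (fun (acc : String) (perm : List String) =>
        (perm.foldl (fun a b => a ++ b) acc) ++ "\n")
      = fun acc perm => acc ++ (pvJoin perm ++ "\n") := by
    funext acc perm
    simp [pvFoldl_shift, String.append_assoc]
  rw [hbody, pvFoldl_cat (fun perm => pvJoin perm ++ "\n")]
  simp [String.empty_append]

theorem pvJoin_snoc (p : List String) (x : String) : pvJoin (p ++ [x]) = pvJoin p ++ x := by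
  rw [pvJoin_append, pvJoin_cons]
  simp [pvJoin]

-- the product can also be built by appending the NEW coordinate on the right
theorem pvProd_snoc (alphabet : List String) : ∀ m : Nat,
    pvProd alphabet (m + 1)
      = (pvProd alphabet m).flatMap (fun p => alphabet.map (fun x => p ++ [x])) := by
  intro m
  induction m with
  | zero =>
      have h : ∀ l : List String, l.flatMap (fun x => [[x]]) = l.map (fun x => [x]) := by
        intro l
        induction l with
        | nil => rfl
        | cons y ys ihy => simp [ihy]
      simp [pvProd, h]
  | succ m ih =>
      conv_lhs => rw [pvProd, ih]
      conv_rhs => rw [pvProd]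
      simp [List.map_flatMap, List.flatMap_assoc, List.flatMap_map, List.map_map,
        Function.comp_def]

-- B's levels are the concatenations of A's tuples, in the same order
theorem pvLines_eq (alphabet : List String) : ∀ m : Nat,
    pvLines alphabet m = (pvProd alphabet m).map pvJoin := by
  intro m
  induction m with
  | zero => simp only [pvLines, pvProd, List.map_cons, List.map_nil, pvJoin, List.foldl_nil]
  | succ m ih =>
      rw [pvLines, ih, pvProd_snoc, List.map_flatMap, List.flatMap_map]
      simp [List.map_map, Function.comp_def, pvJoin_snoc]

-- ===== VERDICT (by name: the statement is the Claim_ definition above) =====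
theorem get_ordered_permutations_spec : Claim_equal_get_ordered_permutations := by
  intro alphabet n _ _
  show get_ordered_permutations alphabet n = get_ordered_permutations_alt alphabet n
  rw [get_ordered_permutations, get_ordered_permutations_alt, pvA_eq, pvLines_eq, List.map_map]
  rfl
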